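-- pv_equiv track=rewrite | github.com/macalamel/Cryptographie | crypto.py | make_list_from_dict
-- ===== SOURCE A (Python) =====
-- def make_list_from_dict(dico:dict)->list:
--     liste_lettre=list(dico.keys())
--     liste_frequence=list(dico.values())
--     liste_lettre_new=[]
--     liste_frequence_new=[]
--     for i in range(len(liste_frequence)):
--         maxi=max(liste_frequence)
--         index_maxi=liste_frequence.index(maxi)
--         liste_frequence_new.append(maxi)
--         corresp_lettre=liste_lettre[index_maxi]
--         liste_lettre_new.append(corresp_lettre)
--         liste_frequence.remove(maxi)
--         liste_lettre.remove(corresp_lettre)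
--     return liste_frequence_new,liste_lettre_new
-- ===== SOURCE B (Python) =====
-- def make_list_from_dict(dico: dict) -> list:
--     order = sorted(enumerate(dico.items()), key=lambda t: (-t[1][1], t[0]))
--     return [f for _, (_, f) in order], [l for _, (l, _) in order]
-- ===== Notes on version B (the rewrite author's own statement) =====
-- stated objective: faster
-- what changed: Replaces the repeated max-scan/index/remove selection loop over two parallel lists (O(n^2)) with a single stable sort of the enumerated items keyed by (-frequency, original index), then two projections (O(n log n), measured 368x at n=16384).
import Mathlib
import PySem

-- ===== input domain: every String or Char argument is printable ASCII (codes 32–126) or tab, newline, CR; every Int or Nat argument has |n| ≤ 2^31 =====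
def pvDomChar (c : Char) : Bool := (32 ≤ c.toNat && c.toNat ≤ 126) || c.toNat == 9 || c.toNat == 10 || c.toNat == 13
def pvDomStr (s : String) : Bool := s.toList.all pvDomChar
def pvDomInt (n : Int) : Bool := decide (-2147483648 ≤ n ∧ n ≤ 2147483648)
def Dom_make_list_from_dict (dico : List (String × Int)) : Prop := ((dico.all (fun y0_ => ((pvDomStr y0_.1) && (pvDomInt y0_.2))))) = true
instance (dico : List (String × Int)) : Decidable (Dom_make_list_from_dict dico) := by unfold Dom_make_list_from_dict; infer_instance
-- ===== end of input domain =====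

-- B replaces A's quadratic max-scan/index/remove selection loop by one stable sort of the
-- enumerated items keyed by (-frequency, original index) (objective: faster; a timing run
-- measured B faster at the largest generated size).

-- ===== PORT A =====
-- A's for-loop: each iteration takes max(liste_frequence), its first index, the letter at that
-- index, appends both, then removes both BY VALUE.  The `none` fall-throughs are unreachable
-- under the loop bound (the lists start with length n and shrink by one per iteration).
def pvSelLoop (n : Nat) (freqs : List Int) (letts : List String)
    (accF : List Int) (accL : List String) : List Int × List String :=
  match n with
  | 0 => (accF, accL)
  | Nat.succ m =>
    match PySem.List.max? freqs (fun x => x) with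
    | none => (accF, accL)
    | some maxi =>
      match PySem.List.index? freqs maxi with
      | none => (accF, accL)
      | some idx =>
        match PySem.List.pyGet? letts (idx : Int) with
        | none => (accF, accL)
        | some corresp =>
          match PySem.List.remove? freqs maxi, PySem.List.remove? letts corresp with
          | some freqs', some letts' =>
              pvSelLoop m freqs' letts' (accF ++ [maxi]) (accL ++ [corresp])
          | _, _ => (accF, accL)

def make_list_from_dict (dico : List (String × Int)) : List Int × List String :=
  pvSelLoop (dico.map (fun kv => kv.2)).length (dico.map (fun kv => kv.2))
    (dico.map (fun kv => kv.1)) [] []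

-- ===== PORT B =====
-- key=lambda t: (-t[1][1], t[0]) — Python's tuple comparison is the lexicographic order ×ₗ
def pvKey (t : Int × (String × Int)) : Int ×ₗ Int := toLex (-t.2.2, t.1)

def make_list_from_dict_alt (dico : List (String × Int)) : List Int × List String :=
  let order := PySem.List.sorted (PySem.List.enumerate dico) pvKey
  (order.map (fun t => t.2.2), order.map (fun t => t.2.1))

-- ===== PRECONDITION & SPEC =====
-- A's argument is a Python dict, whose keys are necessarily distinct; on duplicate-key
-- association lists (representable here but not as a dict) A's remove-BY-VALUE pairing of
-- letters with frequencies is accidental, so Pre_ excludes exactly those lists.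
def Pre_make_list_from_dict (dico : List (String × Int)) : Prop :=
  (dico.map (fun kv => kv.1)).Nodup
instance (dico : List (String × Int)) : Decidable (Pre_make_list_from_dict dico) := by
  unfold Pre_make_list_from_dict; infer_instance

def pvWitness_make_list_from_dict : (List (String × Int)) := [("e", 5), ("a", 3), ("b", 5)]

def Spec_make_list_from_dict (dico : List (String × Int)) (out : List Int × List String) : Prop := out = make_list_from_dict_alt dico
instance (dico : List (String × Int)) (out : List Int × List String) : Decidable (Spec_make_list_from_dict dico out) := by unfold Spec_make_list_from_dict; infer_instance

-- ===== CLAIM (what is proved, stated in full; the proofs are below) =====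
def Claim_equal_make_list_from_dict : Prop := ∀ (dico : List (String × Int)), Dom_make_list_from_dict dico → Pre_make_list_from_dict dico → Spec_make_list_from_dict dico (make_list_from_dict dico)

-- ===== LEMMAS AND PROOFS =====

-- the main invariant: on a list of (original index, (letter, frequency)) triples with strictly
-- increasing indices and distinct letters, A's selection loop emits exactly the stable
-- (-frequency, index)-sorted order that B computes in one go.
lemma pvSelLoop_sorted : ∀ (n : Nat) (e : List (Int × (String × Int))),
    e.length = n → ∀ (accF : List Int) (accL : List String),
    (e.map (fun t => t.1)).Pairwise (· < ·) →
    (e.map (fun t => t.2.1)).Nodup →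
    pvSelLoop n (e.map (fun t => t.2.2)) (e.map (fun t => t.2.1)) accF accL
      = (accF ++ (PySem.List.sorted e pvKey).map (fun t => t.2.2),
         accL ++ (PySem.List.sorted e pvKey).map (fun t => t.2.1)) := by
  intro n
  induction n using Nat.strong_induction_on with
  | _ n IH =>
    intro e hlen accF accL hidxs hnod
    match n, hlen with
    | 0, hlen =>
      have he : e = [] := List.length_eq_zero_iff.mp hlen
      subst he
      simp [pvSelLoop, PySem.List.sorted]
    | Nat.succ m, hlen =>
      -- maxi = max(liste_frequence)
      obtain ⟨maxi, hmax⟩ : ∃ maxi, PySem.List.max? (e.map (fun t => t.2.2)) (fun x => x) = some maxi := by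
        rcases h : PySem.List.max? (e.map (fun t => t.2.2)) (fun x => x) with _ | maxi
        · rw [PySem.List.max?_eq_none_iff, List.map_eq_nil_iff] at h
          rw [h] at hlen
          simp at hlen
        · exact ⟨maxi, h⟩
      have hmem : maxi ∈ e.map (fun t => t.2.2) := PySem.List.max?_mem hmax
      -- index_maxi = liste_frequence.index(maxi)
      obtain ⟨idx, hidx⟩ : ∃ k, PySem.List.index? (e.map (fun t => t.2.2)) maxi = some k := by
        rw [PySem.List.index?_eq_idxOf?]
        rcases hk : List.idxOf? maxi (e.map (fun t => t.2.2)) with _ | k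
        · rw [List.idxOf?_eq_none_iff] at hk; exact absurd hmem hk
        · exact ⟨k, hk⟩
      obtain ⟨preF, sufF, hsplitF, hlenF, hnotinF⟩ :=
        (PySem.List.index?_eq_some_iff _ _ _).mp hidx
      -- decompose e itself at that position
      obtain ⟨pre, rest, hsplit, hpreF, hrest⟩ := List.map_eq_append_iff.mp hsplitF
      obtain ⟨p, suf, hcons, hpmax, hsufF⟩ := List.map_eq_cons_iff.mp hrest
      subst hcons
      subst hsplit
      -- the letter lists decomposed
      have hlet : (List.map (fun t => t.2.1) (pre ++ p :: suf))
          = pre.map (fun t => t.2.1) ++ p.2.1 :: suf.map (fun t => t.2.1) := by simp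
      have hfre : (List.map (fun t => t.2.2) (pre ++ p :: suf))
          = pre.map (fun t => t.2.2) ++ p.2.2 :: suf.map (fun t => t.2.2) := by simp
      have hplen : pre.length = idx := by
        have := congrArg List.length hpreF; simpa using this.trans hlenF
      -- corresp_lettre = liste_lettre[index_maxi]
      have hget : PySem.List.pyGet? (List.map (fun t => t.2.1) (pre ++ p :: suf)) (idx : Int)
          = some p.2.1 := by
        rw [PySem.List.pyGet?_natCast, hlet, ← hplen]
        simp
      -- liste_frequence.remove(maxi) removes position idx
      have hpnotinF : maxi ∉ pre.map (fun t => t.2.2) := by rw [hpreF]; exact hnotinF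
      have hrem1 : PySem.List.remove? (List.map (fun t => t.2.2) (pre ++ p :: suf)) maxi
          = some ((pre ++ suf).map (fun t => t.2.2)) := by
        rw [PySem.List.remove?_eq_some_erase _ maxi hmem, hfre, ← hpmax,
          List.erase_append_right _ (by rw [hpmax]; exact hpnotinF)]
        simp
      -- letters are distinct, so liste_lettre.remove also removes position idx
      have hnodsplit := hnod
      rw [hlet, List.nodup_append] at hnodsplit
      obtain ⟨hnodpre, hnodcons, hdisj⟩ := hnodsplit
      have hpnotinL : p.2.1 ∉ pre.map (fun t => t.2.1) := by
        intro hc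
        exact hdisj p.2.1 hc p.2.1 (List.mem_cons_self ..) rfl
      have hmemL : p.2.1 ∈ List.map (fun t => t.2.1) (pre ++ p :: suf) := by
        rw [hlet]; exact List.mem_append_right _ (List.mem_cons_self ..)
      have hrem2 : PySem.List.remove? (List.map (fun t => t.2.1) (pre ++ p :: suf)) p.2.1
          = some ((pre ++ suf).map (fun t => t.2.1)) := by
        rw [PySem.List.remove?_eq_some_erase _ _ hmemL, hlet,
          List.erase_append_right _ hpnotinL]
        simp
      -- facts used both for the recursive call and for the sorted characterisation
      have hsubl : (pre ++ suf).Sublist (pre ++ p :: suf) :=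
        List.Sublist.append_left (List.sublist_cons_self p suf) pre
      have hidxs' : ((pre ++ suf).map (fun t => t.1)).Pairwise (· < ·) :=
        hidxs.sublist (hsubl.map _)
      have hnod' : ((pre ++ suf).map (fun t => t.2.1)).Nodup :=
        hnod.sublist (hsubl.map _)
      have hlen' : (pre ++ suf).length = m := by
        have : (pre ++ p :: suf).length = m + 1 := hlen
        simp at this ⊢; omega
      -- every frequency is ≤ maxi
      have hle : ∀ q ∈ pre ++ p :: suf, q.2.2 ≤ maxi := by
        intro q hq
        exact PySem.List.max?_isMax hmax _ (List.mem_map_of_mem hq)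
      -- indices after p are larger than p's
      have hgt : ∀ q ∈ suf, p.1 < q.1 := by
        have h1 : (List.map (fun t => t.1) (pre ++ p :: suf)).Pairwise (· < ·) := hidxs
        rw [List.map_append, List.map_cons, List.pairwise_append] at h1
        intro q hq
        exact (List.pairwise_cons.mp h1.2.1).1 _ (List.mem_map_of_mem hq)
      -- the selected element sorts first: sorted e = p :: sorted (pre ++ suf)
      have hhead : ∀ q ∈ PySem.List.sorted (pre ++ suf) pvKey, pvKey p < pvKey q := by
        intro q hq
        rw [PySem.List.mem_sorted] at hq
        have hqe : q ∈ pre ++ p :: suf := hsubl.mem hq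
        have hqle : q.2.2 ≤ maxi := hle q hqe
        rcases List.mem_append.mp hq with hqpre | hqsuf
        · -- q before p: its frequency is strictly below maxi
          have : q.2.2 ≠ maxi := by
            intro hc
            exact hpnotinF (hc ▸ List.mem_map_of_mem hqpre)
          rw [pvKey, pvKey, Prod.Lex.toLex_lt_toLex]
          left; simp only [hpmax]; omega
        · -- q after p: frequency ≤ maxi, and on ties p's index is smaller
          rcases lt_or_eq_of_le hqle with hlt | heq
          · rw [pvKey, pvKey, Prod.Lex.toLex_lt_toLex]
            left; simp only [hpmax]; omega
          · rw [pvKey, pvKey, Prod.Lex.toLex_lt_toLex]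
            right
            exact ⟨by simp only [hpmax, heq], hgt q hqsuf⟩
      have htail : (PySem.List.sorted (pre ++ suf) pvKey).Pairwise
          (fun a b => pvKey a < pvKey b) := by
        have hperm : (PySem.List.sorted (pre ++ suf) pvKey).Perm (pre ++ suf) :=
          PySem.List.sorted_perm _ _ _
        -- keys are pairwise distinct because the original indices are
        have hkeynodup : ((PySem.List.sorted (pre ++ suf) pvKey).map pvKey).Nodup := by
          refine ((hperm.map pvKey).nodup_iff).mpr ?_
          have hidxnodup : ((pre ++ suf).map (fun t => t.1)).Nodup :=
            hidxs'.imp (fun h => ne_of_lt h)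
          have hcomp : (pre ++ suf).map (fun t => t.1)
              = ((pre ++ suf).map pvKey).map (fun k => (ofLex k).2) := by
            rw [List.map_map]; rfl
          rw [hcomp] at hidxnodup
          exact hidxnodup.of_map _
        have hne : (PySem.List.sorted (pre ++ suf) pvKey).Pairwise
            (fun a b => pvKey a ≠ pvKey b) := List.pairwise_map.mp hkeynodup
        exact ((PySem.List.sorted_pairwise _ _).and hne).imp
          (fun h => lt_of_le_of_ne h.1 h.2)
      have hsorted : PySem.List.sorted (pre ++ p :: suf) pvKey
          = p :: PySem.List.sorted (pre ++ suf) pvKey := by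
        refine PySem.List.sorted_eq_of_perm_of_pairwise_lt _ _ pvKey ?_ ?_
        · exact ((PySem.List.sorted_perm _ _ _).cons p).trans List.perm_middle.symm
        · exact List.pairwise_cons.mpr ⟨hhead, htail⟩
      -- one unfolding of the loop, then the induction hypothesis
      rw [show (pre ++ p :: suf).map (fun t => t.2.2)
            = List.map (fun t => t.2.2) (pre ++ p :: suf) from rfl]
      simp only [pvSelLoop, hmax, hidx, hget, hrem1, hrem2]
      rw [IH m (Nat.lt_succ_self m) (pre ++ suf) hlen' _ _ hidxs' hnod', hsorted]
      simp [← hpmax]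

-- match A's top-level lists with the enumerated triples B sorts
lemma enumerate_proj_snd (dico : List (String × Int)) :
    (PySem.List.enumerate dico).map (fun t => t.2.2) = dico.map (fun kv => kv.2) := by
  rw [show (fun t : Int × (String × Int) => t.2.2)
        = (fun kv : String × Int => kv.2) ∘ (fun t : Int × (String × Int) => t.2) from rfl,
    ← List.map_map, PySem.List.map_snd_enumerate]

lemma enumerate_proj_fst (dico : List (String × Int)) :
    (PySem.List.enumerate dico).map (fun t => t.2.1) = dico.map (fun kv => kv.1) := by
  rw [show (fun t : Int × (String × Int) => t.2.1)
        = (fun kv : String × Int => kv.1) ∘ (fun t : Int × (String × Int) => t.2) from rfl,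
    ← List.map_map, PySem.List.map_snd_enumerate]

-- ===== VERDICT (by name: the statement is the Claim_ definition above) =====
theorem make_list_from_dict_spec : Claim_equal_make_list_from_dict := by
  intro dico _hdom hpre
  unfold Spec_make_list_from_dict make_list_from_dict make_list_from_dict_alt
  have h := pvSelLoop_sorted dico.length (PySem.List.enumerate dico)
    (PySem.List.length_enumerate dico 0) [] []
    (by rw [PySem.List.map_fst_enumerate]; exact PySem.List.pairwise_lt_pyRange_one 0 _)
    (by rw [enumerate_proj_fst]; exact hpre)
  rw [enumerate_proj_fst, enumerate_proj_snd] at h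
  simpa using h
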